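-- pv_equiv track=rewrite | github.com/deanmauriceellis-cloud/LocationMapApp | cache-proxy/scripts/generate-npc-portraits.py | role_type_of
-- ===== SOURCE A (Python) =====
-- def role_type_of(role: str, faction: str | None) -> str:
--     """Mirror of Kotlin roleTypeOf() heuristic."""
--     s = (role or "").lower() + " " + (faction or "").lower()
--     if any(w in s for w in ["judge", "examiner", "justice", "magistrate"]):
--         return "JUDGE"
--     if any(w in s for w in ["minister", "reverend", "clergy"]) or s.startswith("rev_"):
--         return "CLERGY"
--     if any(w in s for w in ["afflicted", "accuser", "complaint filer", "parish clerk"]) or "putnam/accuser" in s: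
--         return "ACCUSER"
--     if any(w in s for w in ["accused", "hanged", "executed", "pressed", "prison", "confessor", "recanter", "victim"]):
--         return "ACCUSED"
--     if any(w in s for w in ["governor", "constable", "physician", "deputy", "militia", "merchant", "intellectual"]):
--         return "OFFICIAL"
--     return "OTHER"
-- ===== SOURCE B (Python) =====
-- # Min-rank aggregation: collect the ranks of ALL matching keywords in one comprehension
-- # and resolve priority numerically with min(), instead of an ordered early-return cascade.
-- GROUPS = [
--     ["judge", "examiner", "justice", "magistrate"],
--     ["minister", "reverend", "clergy"],
--     ["afflicted", "accuser", "complaint filer", "parish clerk", "putnam/accuser"],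
--     ["accused", "hanged", "executed", "pressed", "prison", "confessor", "recanter", "victim"],
--     ["governor", "constable", "physician", "deputy", "militia", "merchant", "intellectual"],
-- ]
-- CATS = ["JUDGE", "CLERGY", "ACCUSER", "ACCUSED", "OFFICIAL"]
--
-- def role_type_of(role: str, faction: str | None) -> str:
--     s = (role or "").lower() + " " + (faction or "").lower()
--     hits = [r for r, ws in enumerate(GROUPS) for w in ws if w in s]
--     if s.startswith("rev_"):
--         hits.append(1)
--     return CATS[min(hits)] if hits else "OTHER"
-- ===== Notes on version B (the rewrite author's own statement) =====
-- stated objective: alternative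
-- what changed: Instead of an ordered early-return if-cascade, B collects the ranks of ALL matching keywords (plus rank 1 for the rev_ prefix) in one comprehension and resolves priority numerically as CATS[min(hits)], falling back to OTHER when no keyword matches.
import Mathlib
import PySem

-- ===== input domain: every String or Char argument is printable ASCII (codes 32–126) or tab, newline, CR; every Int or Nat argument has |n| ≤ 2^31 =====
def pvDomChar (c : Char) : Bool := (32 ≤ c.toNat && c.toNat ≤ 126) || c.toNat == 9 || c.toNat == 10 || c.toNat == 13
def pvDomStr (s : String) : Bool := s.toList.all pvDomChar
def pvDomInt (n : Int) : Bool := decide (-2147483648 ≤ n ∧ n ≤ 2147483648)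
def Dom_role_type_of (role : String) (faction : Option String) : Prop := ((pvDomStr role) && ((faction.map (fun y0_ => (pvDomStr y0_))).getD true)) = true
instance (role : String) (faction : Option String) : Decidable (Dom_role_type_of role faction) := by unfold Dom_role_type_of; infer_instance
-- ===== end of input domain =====

-- B replaces A's ordered early-return cascade by collecting the ranks of ALL matching
-- keywords in one pass and resolving priority numerically with min (objective: alternative).

-- ===== PORT A =====
def role_type_of (role : String) (faction : Option String) : String :=
  -- s = (role or "").lower() + " " + (faction or "").lower()  (x or "" = x for strings)
  let s := PySem.Str.lower role ++ " " ++ PySem.Str.lower (faction.getD "")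
  if ["judge", "examiner", "justice", "magistrate"].any (fun w => PySem.Str.isIn w s) then "JUDGE"
  else if ["minister", "reverend", "clergy"].any (fun w => PySem.Str.isIn w s) || PySem.Str.startswith s "rev_" then "CLERGY"
  else if ["afflicted", "accuser", "complaint filer", "parish clerk"].any (fun w => PySem.Str.isIn w s) || PySem.Str.isIn "putnam/accuser" s then "ACCUSER"
  else if ["accused", "hanged", "executed", "pressed", "prison", "confessor", "recanter", "victim"].any (fun w => PySem.Str.isIn w s) then "ACCUSED"
  else if ["governor", "constable", "physician", "deputy", "militia", "merchant", "intellectual"].any (fun w => PySem.Str.isIn w s) then "OFFICIAL"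
  else "OTHER"

-- ===== PORT B =====
def pvGroups : List (List String) :=
  [ ["judge", "examiner", "justice", "magistrate"],
    ["minister", "reverend", "clergy"],
    ["afflicted", "accuser", "complaint filer", "parish clerk", "putnam/accuser"],
    ["accused", "hanged", "executed", "pressed", "prison", "confessor", "recanter", "victim"],
    ["governor", "constable", "physician", "deputy", "militia", "merchant", "intellectual"] ]

def pvCats : List String := ["JUDGE", "CLERGY", "ACCUSER", "ACCUSED", "OFFICIAL"]

def role_type_of_alt (role : String) (faction : Option String) : String :=
  let s := PySem.Str.lower role ++ " " ++ PySem.Str.lower (faction.getD "")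
  -- hits = [r for r, ws in enumerate(GROUPS) for w in ws if w in s]
  let hits := (PySem.List.enumerate pvGroups 0).flatMap
      (fun rws => (rws.2.filter (fun w => PySem.Str.isIn w s)).map (fun _ => rws.1))
  let hits := if PySem.Str.startswith s "rev_" then hits ++ [(1 : Int)] else hits
  -- CATS[min(hits)] if hits else "OTHER"  (min? = none exactly when hits is empty;
  -- the index min(hits) is always in range for CATS, so .getD is never taken)
  match PySem.List.min? hits (fun x => x) with
  | none => "OTHER"
  | some r => (PySem.List.pyGet? pvCats r).getD "OTHER"

-- ===== PRECONDITION & SPEC =====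
def Spec_role_type_of (role : String) (faction : Option String) (out : String) : Prop := out = role_type_of_alt role faction
instance (role : String) (faction : Option String) (out : String) : Decidable (Spec_role_type_of role faction out) := by unfold Spec_role_type_of; infer_instance

-- ===== CLAIM (what is proved, stated in full; the proofs are below) =====
def Claim_equal_role_type_of : Prop := ∀ (role : String) (faction : Option String), Dom_role_type_of role faction → Spec_role_type_of role faction (role_type_of role faction)

-- ===== LEMMAS AND PROOFS =====

-- minimum of a list of copies of r, seeded by r
theorem foldl_min_const (r : Int) {α : Type} (l : List α) :
    (l.map (fun _ => r)).foldl min r = r := by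
  induction l with
  | nil => rfl
  | cons x t ih => simpa [min_self] using ih

theorem foldl_min_pull (m : List Int) (a b : Int) :
    m.foldl min (min a b) = min a (m.foldl min b) := by
  induction m generalizing a b with
  | nil => rfl
  | cons y u ih => simp [List.foldl_cons, min_assoc, ih]

-- combine option-minima
def omin : Option Int → Option Int → Option Int
  | none, b => b
  | a, none => a
  | some x, some y => some (min x y)

theorem foldl_min_eq_omin (m : List Int) (a : Int) :
    m.foldl min a = match PySem.List.min? m (fun x => x) with
      | none => a
      | some y => min a y := by
  cases m with
  | nil => rfl
  | cons y u =>
    rw [PySem.List.min?_id_cons]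
    simpa using foldl_min_pull u a y

theorem min?_id_append (l m : List Int) :
    PySem.List.min? (l ++ m) (fun x => x) =
      omin (PySem.List.min? l (fun x => x)) (PySem.List.min? m (fun x => x)) := by
  cases l with
  | nil =>
    have h0 : PySem.List.min? ([] : List Int) (fun x => x) = none := rfl
    rw [List.nil_append, h0]
    cases PySem.List.min? m (fun x => x) <;> rfl
  | cons x t =>
    rw [List.cons_append, PySem.List.min?_id_cons, PySem.List.min?_id_cons,
      List.foldl_append, foldl_min_eq_omin m (t.foldl min x)]
    cases PySem.List.min? m (fun x => x) <;> simp [omin]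

-- the rank list of one group reduces to its any-match boolean
theorem group_min (s : String) (r : Int) (ws : List String) :
    PySem.List.min? ((ws.filter (fun w => PySem.Str.isIn w s)).map (fun _ => r)) (fun x => x)
      = if ws.any (fun w => PySem.Str.isIn w s) then some r else none := by
  cases h : ws.filter (fun w => PySem.Str.isIn w s) with
  | nil =>
    have hb : ws.any (fun w => PySem.Str.isIn w s) = false :=
      List.any_eq_false.2 (List.filter_eq_nil_iff.mp h)
    have h0 : PySem.List.min? (List.map (fun _ => r) ([] : List String)) (fun x => x) = none := rfl
    rw [h0, hb]
    rfl
  | cons x u =>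
    have hx : x ∈ ws.filter (fun w => PySem.Str.isIn w s) := by
      rw [h]; exact List.mem_cons_self
    rcases List.mem_filter.1 hx with ⟨hm, hp⟩
    have hb : ws.any (fun w => PySem.Str.isIn w s) = true := List.any_eq_true.2 ⟨x, hm, hp⟩
    simp only [hb, if_true, List.map_cons, PySem.List.min?_id_cons, foldl_min_const]

set_option maxHeartbeats 4000000 in
theorem ports_agree (s : String) :
    (if ["judge", "examiner", "justice", "magistrate"].any (fun w => PySem.Str.isIn w s) then "JUDGE"
     else if ["minister", "reverend", "clergy"].any (fun w => PySem.Str.isIn w s) || PySem.Str.startswith s "rev_" then "CLERGY"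
     else if ["afflicted", "accuser", "complaint filer", "parish clerk"].any (fun w => PySem.Str.isIn w s) || PySem.Str.isIn "putnam/accuser" s then "ACCUSER"
     else if ["accused", "hanged", "executed", "pressed", "prison", "confessor", "recanter", "victim"].any (fun w => PySem.Str.isIn w s) then "ACCUSED"
     else if ["governor", "constable", "physician", "deputy", "militia", "merchant", "intellectual"].any (fun w => PySem.Str.isIn w s) then "OFFICIAL"
     else "OTHER")
    =
    (let hits := (PySem.List.enumerate pvGroups 0).flatMap
        (fun rws => (rws.2.filter (fun w => PySem.Str.isIn w s)).map (fun _ => rws.1))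
     let hits := if PySem.Str.startswith s "rev_" then hits ++ [(1 : Int)] else hits
     match PySem.List.min? hits (fun x => x) with
     | none => "OTHER"
     | some r => (PySem.List.pyGet? pvCats r).getD "OTHER") := by
  simp only [pvGroups, PySem.List.enumerate_cons, PySem.List.enumerate_nil,
    List.flatMap_cons, List.flatMap_nil, List.append_nil]
  have hA2 : (["afflicted", "accuser", "complaint filer", "parish clerk"].any (fun w => PySem.Str.isIn w s) || PySem.Str.isIn "putnam/accuser" s)
      = (["afflicted", "accuser", "complaint filer", "parish clerk", "putnam/accuser"].any (fun w => PySem.Str.isIn w s)) := by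
    simp only [List.any_cons, List.any_nil, Bool.or_assoc, Bool.or_false]
  rw [hA2]
  have h1l : PySem.List.min? [(1 : Int)] (fun x => x) = some 1 := rfl
  by_cases hp : PySem.Str.startswith s "rev_" = true <;>
    [rw [if_pos hp]; rw [if_neg hp]] <;>
    simp only [min?_id_append, group_min, h1l] <;>
    (by_cases h0 : ["judge", "examiner", "justice", "magistrate"].any (fun w => PySem.Str.isIn w s) = true <;>
     by_cases h1 : ["minister", "reverend", "clergy"].any (fun w => PySem.Str.isIn w s) = true <;>
     by_cases h2 : ["afflicted", "accuser", "complaint filer", "parish clerk", "putnam/accuser"].any (fun w => PySem.Str.isIn w s) = true <;>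
     by_cases h3 : ["accused", "hanged", "executed", "pressed", "prison", "confessor", "recanter", "victim"].any (fun w => PySem.Str.isIn w s) = true <;>
     by_cases h4 : ["governor", "constable", "physician", "deputy", "militia", "merchant", "intellectual"].any (fun w => PySem.Str.isIn w s) = true <;>
     simp_all [omin, pvCats, PySem.List.pyGet?, PySem.List.pyIdx?])

-- ===== VERDICT (by name: the statement is the Claim_ definition above) =====
theorem role_type_of_spec : Claim_equal_role_type_of := by
  intro role faction _
  unfold Spec_role_type_of role_type_of role_type_of_alt
  exact ports_agree _
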